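-- pv_equiv track=rewrite | github.com/Flemming-DC/Sapi | Editor/server/src/features/highlighter.py | _start_line
-- ===== SOURCE A (Python) =====
-- def _start_line(line_start_indices: list[int], tok_start_index: int, end_line: int) -> int:
--     end_line_start_index = line_start_indices[end_line]
--     if tok_start_index == end_line_start_index:
--         # tok starts and ends on the same line
--         return end_line - 1 # end_line = start_line
--     # last_line_index = len(line_start_indices) - 1
--     line = len(line_start_indices) - 0
--     for line_start_index in reversed(line_start_indices):
--         # line = last_line_index - i
--         if line_start_index <= tok_start_index:
--             # token starts at this line
--             return line
--         line -= 1
--     raise Exception("unreachable code reached")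
-- ===== SOURCE B (Python) =====
-- def _start_line(line_start_indices: list[int], tok_start_index: int, end_line: int) -> int:
--     if tok_start_index == line_start_indices[end_line]:
--         # tok starts and ends on the same line
--         return end_line - 1
--     # line number = 1 + the largest index whose line start is at or before the token
--     return 1 + max(i for i, v in enumerate(line_start_indices) if v <= tok_start_index)
-- ===== Notes on version B (the rewrite author's own statement) =====
-- stated objective: simpler
-- what changed: A's backward scan over reversed(line_start_indices) with a hand-maintained decrementing line counter is replaced by a forward comprehension returning 1 + the maximum index whose line start is <= the token offset.
import Mathlib
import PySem

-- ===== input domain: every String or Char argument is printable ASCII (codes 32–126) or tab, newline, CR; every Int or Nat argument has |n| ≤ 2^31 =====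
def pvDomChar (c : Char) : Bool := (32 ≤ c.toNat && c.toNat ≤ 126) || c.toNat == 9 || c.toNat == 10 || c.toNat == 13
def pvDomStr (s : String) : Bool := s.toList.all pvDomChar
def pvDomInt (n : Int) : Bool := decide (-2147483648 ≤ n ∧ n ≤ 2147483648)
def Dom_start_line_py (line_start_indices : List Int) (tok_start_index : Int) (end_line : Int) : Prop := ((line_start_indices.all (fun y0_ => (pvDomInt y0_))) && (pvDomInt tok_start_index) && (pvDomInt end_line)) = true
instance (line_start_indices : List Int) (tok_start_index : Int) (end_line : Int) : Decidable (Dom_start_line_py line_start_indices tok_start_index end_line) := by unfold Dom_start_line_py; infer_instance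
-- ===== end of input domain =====

-- B replaces A's backward scan with a decrementing counter by a forward
-- max-of-qualifying-indices comprehension; same O(n) cost, simpler code.

-- ===== PORT A =====
-- A's for-loop over reversed(line_start_indices) with the counter `line`;
-- the empty case is the `raise` at the end (excluded by Pre_; sentinel 0).
def pvLoopA (tok_start_index : Int) : List Int → Int → Int
  | [], _ => 0
  | x :: rest, line =>
      if x ≤ tok_start_index then line else pvLoopA tok_start_index rest (line - 1)

def start_line_py (line_start_indices : List Int) (tok_start_index : Int) (end_line : Int) : Int :=
  match PySem.List.pyGet? line_start_indices end_line with
  | none => 0  -- IndexError (excluded by Pre_)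
  | some end_line_start_index =>
      if tok_start_index = end_line_start_index then end_line - 1
      else pvLoopA tok_start_index line_start_indices.reverse (line_start_indices.length : Int)

-- ===== PORT B =====
-- max(i for i, v in enumerate(lsi) if v <= tok); ValueError on empty → none (excluded by Pre_)
def pvMaxIdx (line_start_indices : List Int) (tok_start_index : Int) : Option Int :=
  PySem.List.max?
    (((PySem.List.enumerate line_start_indices 0).filter (fun p => decide (p.2 ≤ tok_start_index))).map (fun p => p.1))
    (fun x => x)

def start_line_py_alt (line_start_indices : List Int) (tok_start_index : Int) (end_line : Int) : Int :=
  match PySem.List.pyGet? line_start_indices end_line with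
  | none => 0  -- IndexError (excluded by Pre_)
  | some v =>
      if tok_start_index = v then end_line - 1
      else
        match pvMaxIdx line_start_indices tok_start_index with
        | none => 0  -- ValueError (excluded by Pre_)
        | some m => 1 + m

-- ===== PRECONDITION & SPEC =====
-- Pre_ excludes exactly the inputs on which A raises: end_line out of Python index
-- range (IndexError) or no line start ≤ the token offset (A's explicit raise).
def Pre_start_line_py (line_start_indices : List Int) (tok_start_index : Int) (end_line : Int) : Prop :=
  PySem.Raise.InRange line_start_indices.length end_line ∧
  ∃ x ∈ line_start_indices, x ≤ tok_start_index
instance (line_start_indices : List Int) (tok_start_index : Int) (end_line : Int) : Decidable (Pre_start_line_py line_start_indices tok_start_index end_line) := by unfold Pre_start_line_py; infer_instance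

def pvWitness_start_line_py : List Int × Int × Int := ([0, 5, 9], 6, 2)

def Spec_start_line_py (line_start_indices : List Int) (tok_start_index : Int) (end_line : Int) (out : Int) : Prop := out = start_line_py_alt line_start_indices tok_start_index end_line
instance (line_start_indices : List Int) (tok_start_index : Int) (end_line : Int) (out : Int) : Decidable (Spec_start_line_py line_start_indices tok_start_index end_line out) := by unfold Spec_start_line_py; infer_instance

-- ===== CLAIM (what is proved, stated in full; the proofs are below) =====
def Claim_equal_start_line_py : Prop := ∀ (line_start_indices : List Int) (tok_start_index : Int) (end_line : Int), Dom_start_line_py line_start_indices tok_start_index end_line → Pre_start_line_py line_start_indices tok_start_index end_line → Spec_start_line_py line_start_indices tok_start_index end_line (start_line_py line_start_indices tok_start_index end_line)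

-- ===== LEMMAS AND PROOFS =====

lemma foldl_max_le {c a : Int} {t : List Int} (ha : a ≤ c) (ht : ∀ y ∈ t, y ≤ c) :
    t.foldl max a ≤ c := by
  induction t generalizing a with
  | nil => simpa using ha
  | cons y ys ih =>
      simp only [List.foldl_cons]
      exact ih (max_le ha (ht y (by simp))) (fun z hz => ht z (by simp [hz]))

lemma max?_append_top {t : List Int} {b : Int} (ht : ∀ y ∈ t, y ≤ b) :
    PySem.List.max? (t ++ [b]) (fun x => x) = some b := by
  cases t with
  | nil => simp [PySem.List.max?_id_cons]
  | cons a rest =>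
      rw [List.cons_append, PySem.List.max?_id_cons]
      congr 1
      rw [List.foldl_append]
      simp only [List.foldl_cons, List.foldl_nil]
      exact max_eq_right (foldl_max_le (ht a (by simp)) (fun z hz => ht z (by simp [hz])))

-- every index produced by pvMaxIdx's list on l is < l.length
lemma idx_lt {l : List Int} {tok : Int} {y : Int}
    (hy : y ∈ ((PySem.List.enumerate l 0).filter (fun p => decide (p.2 ≤ tok))).map (fun p => p.1)) :
    y < (l.length : Int) := by
  simp only [List.mem_map, List.mem_filter] at hy
  obtain ⟨p, ⟨hp, _⟩, rfl⟩ := hy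
  rw [PySem.List.mem_enumerate_iff] at hp
  obtain ⟨k, hk, rfl⟩ := hp
  simp
  exact_mod_cast hk

-- the core: A's reversed loop equals B's max-of-indices form, unconditionally
lemma loop_eq_max (tok : Int) (l : List Int) :
    pvLoopA tok l.reverse (l.length : Int) =
      (match pvMaxIdx l tok with
       | none => 0
       | some m => 1 + m) := by
  induction l using List.reverseRecOn with
  | nil => simp [pvLoopA, pvMaxIdx, PySem.List.max?]
  | append_singleton l' x ih =>
      rw [List.reverse_append]
      simp only [List.reverse_singleton, List.singleton_append, List.length_append,
        List.length_singleton]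
      unfold pvLoopA
      unfold pvMaxIdx
      rw [PySem.List.enumerate_append]
      simp only [List.filter_append, List.map_append]
      by_cases hx : x ≤ tok
      · rw [if_pos hx]
        have : ((PySem.List.enumerate [x] (0 + l'.length)).filter
            (fun p => decide (p.2 ≤ tok))).map (fun p => p.1) = [(l'.length : Int)] := by
          simp [PySem.List.enumerate, hx]
        rw [this, max?_append_top (fun y hy => le_of_lt (idx_lt hy))]
        push_cast; ring
      · rw [if_neg hx]
        have : ((PySem.List.enumerate [x] (0 + l'.length)).filter
            (fun p => decide (p.2 ≤ tok))).map (fun p => p.1) = ([] : List Int) := by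
          simp [PySem.List.enumerate, hx]
        rw [this, List.append_nil]
        have h1 : ((l'.length + 1 : Nat) : Int) - 1 = (l'.length : Int) := by push_cast; ring
        rw [h1, ih]
        rfl

-- ===== VERDICT (by name: the statement is the Claim_ definition above) =====
theorem start_line_py_spec : Claim_equal_start_line_py := by
  intro lsi tok e _ _
  unfold Spec_start_line_py start_line_py start_line_py_alt
  cases h : PySem.List.pyGet? lsi e with
  | none => rfl
  | some v =>
      by_cases htv : tok = v
      · simp [htv]
      · simp only [if_neg htv]
        exact loop_eq_max tok lsi
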